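-- pv_equiv track=rewrite | github.com/JameZUK/PeMCP | pemcp/hashing.py | _strip_sequences
-- ===== SOURCE A (Python) =====
-- def _strip_sequences(s):
--     if len(s) <= 3:
--         return s
--     # Use list accumulation instead of repeated string concatenation.
--     parts = [s[0], s[1], s[2]]
--     for i in range(3, len(s)):
--         if s[i] != s[i-1] or s[i] != s[i-2] or s[i] != s[i-3]:
--             parts.append(s[i])
--     return ''.join(parts)
-- ===== SOURCE B (Python) =====
-- def _strip_sequences(s):
--     # Scan maximal runs of identical characters; emit each run capped at 3.
--     out = []
--     i = 0
--     n = len(s)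
--     while i < n:
--         c = s[i]
--         j = i + 1
--         while j < n and s[j] == c:
--             j += 1
--         out.append(c * min(j - i, 3))
--         i = j
--     return ''.join(out)
-- ===== Notes on version B (the rewrite author's own statement) =====
-- stated objective: alternative
-- what changed: B finds each maximal run of identical characters with an inner scan and emits it capped at 3 copies, instead of A's per-index comparison against the three previous characters (and A's special case for len<=3 disappears).
import Mathlib
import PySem

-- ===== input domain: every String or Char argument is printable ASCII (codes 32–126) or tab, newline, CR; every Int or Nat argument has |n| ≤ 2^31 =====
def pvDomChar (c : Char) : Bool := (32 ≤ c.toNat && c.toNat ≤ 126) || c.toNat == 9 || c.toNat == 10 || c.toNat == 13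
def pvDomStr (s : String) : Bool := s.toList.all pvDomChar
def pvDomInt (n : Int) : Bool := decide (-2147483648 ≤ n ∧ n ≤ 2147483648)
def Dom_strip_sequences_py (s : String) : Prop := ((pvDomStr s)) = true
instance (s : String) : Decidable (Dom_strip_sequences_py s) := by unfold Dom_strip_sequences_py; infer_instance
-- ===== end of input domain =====

-- B computes maximal runs and emits each capped at 3; A compares each index with the
-- three previous indices. Equivalent on all strings; objective: alternative decomposition.

-- ===== PORT A =====
-- the body of A's for-loop: append s[i] when it differs from one of the three previous
def pvStepA (cs : List Char) (acc : List Char) (i : Int) : List Char :=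
  if PySem.List.pyGetD cs i ' ' ≠ PySem.List.pyGetD cs (i-1) ' ' ∨
     PySem.List.pyGetD cs i ' ' ≠ PySem.List.pyGetD cs (i-2) ' ' ∨
     PySem.List.pyGetD cs i ' ' ≠ PySem.List.pyGetD cs (i-3) ' '
  then acc ++ [PySem.List.pyGetD cs i ' ']
  else acc

def strip_sequences_py (s : String) : String :=
  if (s.toList.length : Int) ≤ 3 then s
  else
    String.ofList ((PySem.List.pyRange 3 (s.toList.length : Int) 1).foldl (pvStepA s.toList)
      [PySem.List.pyGetD s.toList 0 ' ', PySem.List.pyGetD s.toList 1 ' ',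
       PySem.List.pyGetD s.toList 2 ' '])

-- ===== PORT B =====
-- Source B's inner `while` scans the current run; ported as takeWhile/dropWhile on the rest.
def pvEmit : List Char → List Char
  | [] => []
  | c :: rest =>
    List.replicate (min ((rest.takeWhile (· == c)).length + 1) 3) c
      ++ pvEmit (rest.dropWhile (· == c))
  termination_by l => l.length
  decreasing_by
    simp only [List.length_cons]
    exact Nat.lt_succ_of_le (List.length_dropWhile_le _ _)

def strip_sequences_py_alt (s : String) : String :=
  String.ofList (pvEmit s.toList)

-- ===== PRECONDITION & SPEC =====
def Spec_strip_sequences_py (s : String) (out : String) : Prop := out = strip_sequences_py_alt s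
instance (s : String) (out : String) : Decidable (Spec_strip_sequences_py s out) := by unfold Spec_strip_sequences_py; infer_instance

-- ===== CLAIM (what is proved, stated in full; the proofs are below) =====
def Claim_equal_strip_sequences_py : Prop := ∀ (s : String), Dom_strip_sequences_py s → Spec_strip_sequences_py s (strip_sequences_py s)

-- ===== LEMMAS AND PROOFS =====

-- A's loop as structural recursion over the tail, carrying the last three characters.
def pvAuxA (a b c : Char) : List Char → List Char
  | [] => []
  | x :: xs => (if x ≠ c ∨ x ≠ b ∨ x ≠ a then [x] else []) ++ pvAuxA b c x xs

-- One-pass counter form: c = current run's character, k = (capped) run length so far.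
def pvAuxC (c : Char) (k : Nat) : List Char → List Char
  | [] => []
  | x :: xs =>
    if x = c then (if k < 3 then [x] else []) ++ pvAuxC c (min (k+1) 3) xs
    else x :: pvAuxC x 1 xs

def pvR (a b c : Char) : Nat := if b = c then (if a = b then 3 else 2) else 1

theorem pvAuxA_eq_pvAuxC (rest : List Char) : ∀ a b c, pvAuxA a b c rest = pvAuxC c (pvR a b c) rest := by
  induction rest with
  | nil => intro a b c; rfl
  | cons x xs ih =>
    intro a b c
    simp only [pvAuxA, pvAuxC, ih, pvR]
    by_cases hxc : x = c
    · subst hxc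
      by_cases hbc : b = x
      · subst hbc
        by_cases hab : a = b
        · subst hab; simp
        · simp [hab, Ne.symm hab]
      · simp [hbc, Ne.symm hbc]
    · simp [hxc, Ne.symm hxc]

theorem pvTakeWhile_eq_replicate (l : List Char) (c : Char) :
    l.takeWhile (· == c) = List.replicate (l.takeWhile (· == c)).length c := by
  induction l with
  | nil => rfl
  | cons x xs ih =>
    by_cases h : x = c
    · subst h; simpa [List.takeWhile_cons, List.replicate_succ] using ih
    · simp [List.takeWhile_cons, h]

theorem pvAuxC_run (rest : List Char) : ∀ (c : Char) (k : Nat),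
    pvAuxC c k rest =
      List.replicate (min (rest.takeWhile (· == c)).length (3 - k)) c ++
        (match rest.dropWhile (· == c) with
         | [] => []
         | y :: ys => y :: pvAuxC y 1 ys) := by
  induction rest with
  | nil => intro c k; rfl
  | cons x xs ih =>
    intro c k
    by_cases hxc : x = c
    · subst hxc
      rw [pvAuxC, if_pos rfl, List.takeWhile_cons_of_pos (by simp), List.dropWhile_cons_of_pos (by simp)]
      rw [ih x (min (k+1) 3)]
      by_cases hk : k < 3
      · have h3 : 3 - min (k+1) 3 = 3 - k - 1 := by omega
        rw [if_pos hk, h3]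
        have : min ((xs.takeWhile (· == x)).length + 1) (3 - k)
            = min ((xs.takeWhile (· == x)).length) (3 - k - 1) + 1 := by omega
        simp only [List.length_cons, this, List.replicate_succ, List.cons_append,
          List.nil_append, List.singleton_append]
      · have h3 : 3 - min (k+1) 3 = 0 := by omega
        have h0 : 3 - k = 0 := by omega
        rw [if_neg hk, h3, h0]
        simp
    · simp [pvAuxC, List.takeWhile_cons, List.dropWhile_cons, hxc]

theorem pvEmit_eq_pvAuxC (n : Nat) : ∀ (c : Char) (rest : List Char), rest.length < n →
    pvEmit (c :: rest) = c :: pvAuxC c 1 rest := by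
  induction n with
  | zero => intro c rest h; omega
  | succ n ih =>
    intro c rest h
    rw [pvEmit, pvAuxC_run]
    have hd := List.length_dropWhile_le (· == c) rest
    have hmin : min ((rest.takeWhile (· == c)).length + 1) 3
        = min (rest.takeWhile (· == c)).length (3 - 1) + 1 := by omega
    rw [hmin, List.replicate_succ]
    cases hdw : rest.dropWhile (· == c) with
    | nil => simp [pvEmit]
    | cons y ys =>
      have hys : ys.length < n := by
        have := hd; rw [hdw] at this; simp at this; omega
      rw [ih y ys hys]
      simp

theorem pvEmit_cons (c : Char) (rest : List Char) : pvEmit (c :: rest) = c :: pvAuxC c 1 rest :=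
  pvEmit_eq_pvAuxC (rest.length + 1) c rest (by omega)

-- pvEmit is the identity on strings of length ≤ 3 (every run has length ≤ 3).
theorem pvEmit_short (n : Nat) : ∀ (l : List Char), l.length < n → l.length ≤ 3 → pvEmit l = l := by
  induction n with
  | zero => intro l h _; omega
  | succ n ih =>
    intro l h h3
    cases l with
    | nil => rw [pvEmit]
    | cons c rest =>
      rw [pvEmit]
      have htw : (rest.takeWhile (· == c)).length ≤ rest.length :=
        (List.takeWhile_prefix _).length_le
      have hlen : rest.length ≤ 2 := by simp at h3; omega
      have hmin : min ((rest.takeWhile (· == c)).length + 1) 3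
          = (rest.takeWhile (· == c)).length + 1 := by omega
      rw [hmin, List.replicate_succ]
      have hd := List.length_dropWhile_le (· == c) rest
      rw [ih (rest.dropWhile (· == c)) (by simp at h; omega) (by omega)]
      have : List.replicate (rest.takeWhile (· == c)).length c = rest.takeWhile (· == c) :=
        (pvTakeWhile_eq_replicate rest c).symm
      rw [this]
      simp [List.takeWhile_append_dropWhile]

-- The bridged form used by the main proof: for a window of three leading characters,
-- the first three are always emitted and the counter starts at pvR.
theorem pvEmit_window (c0 c1 c2 : Char) (rest : List Char) :
    pvEmit (c0 :: c1 :: c2 :: rest) = c0 :: c1 :: c2 :: pvAuxC c2 (pvR c0 c1 c2) rest := by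
  rw [pvEmit_cons]
  simp only [pvAuxC, pvR]
  by_cases h1 : c1 = c0
  · subst h1
    by_cases h2 : c2 = c1
    · subst h2; simp [pvAuxC]
    · simp [pvAuxC, h2, Ne.symm h2]
  · by_cases h2 : c2 = c1
    · subst h2; simp [pvAuxC, h1, Ne.symm h1]
    · simp [pvAuxC, h1, h2, Ne.symm h2]

-- A's foldl over range(3, n) equals pvAuxA on the remaining suffix.
theorem pvFoldA (cs : List Char) (rest : List Char) : ∀ (done : List Char) (a b c : Char)
    (acc : List Char), cs = done ++ a :: b :: c :: rest →
    (PySem.List.pyRange ((done.length : Int) + 3) (cs.length : Int) 1).foldl (pvStepA cs) acc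
      = acc ++ pvAuxA a b c rest := by
  induction rest with
  | nil =>
    intro done a b c acc hcs
    have hlen : (cs.length : Int) = done.length + 3 := by subst hcs; simp; try omega
    rw [hlen, PySem.List.pyRange_one_eq_nil (by omega)]
    simp [pvAuxA]
  | cons x xs ih =>
    intro done a b c acc hcs
    have hlen : (cs.length : Int) = done.length + 4 + xs.length := by subst hcs; simp; omega
    have hcons : PySem.List.pyRange ((done.length : Int) + 3) (cs.length : Int) 1
        = ((done.length : Int) + 3) :: PySem.List.pyRange ((done.length : Int) + 4) (cs.length : Int) 1 := by
      have := PySem.List.pyRange_one_cons (a := (done.length : Int) + 3) (b := (cs.length : Int)) (by omega)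
      simpa using this
    rw [hcons, List.foldl_cons]
    have hget : ∀ (j : Nat), j < 4 + xs.length →
        PySem.List.pyGetD cs ((done.length : Int) + j) ' ' = (a :: b :: c :: x :: xs).getD j ' ' := by
      intro j hj
      subst hcs
      rw [show ((done.length : Int) + j) = ((done.length + j : Nat) : Int) by push_cast; ring,
        PySem.List.pyGetD_natCast, List.getD_append_right done (a :: b :: c :: x :: xs) ' '
          (done.length + j) (Nat.le_add_right _ _)]
      congr 1
      omega
    have e0 : PySem.List.pyGetD cs ((done.length : Int) + 3) ' ' = x := by
      have := hget 3 (by omega); simpa using this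
    have e1 : PySem.List.pyGetD cs ((done.length : Int) + 3 - 1) ' ' = c := by
      have := hget 2 (by omega); rw [show (done.length : Int) + 3 - 1 = (done.length : Int) + 2 by ring]
      simpa using this
    have e2 : PySem.List.pyGetD cs ((done.length : Int) + 3 - 2) ' ' = b := by
      have := hget 1 (by omega); rw [show (done.length : Int) + 3 - 2 = (done.length : Int) + 1 by ring]
      simpa using this
    have e3 : PySem.List.pyGetD cs ((done.length : Int) + 3 - 3) ' ' = a := by
      have := hget 0 (by omega); rw [show (done.length : Int) + 3 - 3 = (done.length : Int) + 0 by ring]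
      simpa using this
    have hbody : pvStepA cs acc ((done.length : Int) + 3)
        = acc ++ (if x ≠ c ∨ x ≠ b ∨ x ≠ a then [x] else []) := by
      unfold pvStepA
      rw [e0, e1, e2, e3]
      split_ifs <;> simp
    have hstep := ih (done ++ [a]) b c x (acc ++ (if x ≠ c ∨ x ≠ b ∨ x ≠ a then [x] else []))
      (by simpa using hcs)
    rw [show ((done ++ [a]).length : Int) + 3 = (done.length : Int) + 4 by simp; ring] at hstep
    rw [hbody, hstep, pvAuxA, List.append_assoc]

-- ===== VERDICT (by name: the statement is the Claim_ definition above) =====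
theorem strip_sequences_py_spec : Claim_equal_strip_sequences_py := by
  intro s _
  unfold Spec_strip_sequences_py strip_sequences_py strip_sequences_py_alt
  by_cases hle : ((s.toList.length : Int) ≤ 3)
  · rw [if_pos hle]
    rw [pvEmit_short (s.toList.length + 1) s.toList (by omega) (by omega)]
    exact String.ofList_toList.symm
  · rw [if_neg hle]
    have h4 : 4 ≤ s.toList.length := by omega
    obtain ⟨c0, t0, h0⟩ : ∃ c t, s.toList = c :: t := by
      cases hc : s.toList with
      | nil => rw [hc] at h4; simp at h4
      | cons c t => exact ⟨c, t, rfl⟩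
    obtain ⟨c1, t1, h1⟩ : ∃ c t, t0 = c :: t := by
      cases hc : t0 with
      | nil => rw [h0, hc] at h4; simp at h4
      | cons c t => exact ⟨c, t, rfl⟩
    obtain ⟨c2, t2, h2⟩ : ∃ c t, t1 = c :: t := by
      cases hc : t1 with
      | nil => rw [h0, h1, hc] at h4; simp at h4
      | cons c t => exact ⟨c, t, rfl⟩
    have hcs : s.toList = [] ++ c0 :: c1 :: c2 :: t2 := by simp [h0, h1, h2]
    have hfold := pvFoldA s.toList t2 [] c0 c1 c2
      [PySem.List.pyGetD s.toList 0 ' ', PySem.List.pyGetD s.toList 1 ' ', PySem.List.pyGetD s.toList 2 ' ']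
      hcs
    simp only [List.length_nil, Nat.cast_zero, zero_add] at hfold
    rw [hfold]
    have g0 : PySem.List.pyGetD s.toList 0 ' ' = c0 := by
      rw [hcs, show ((0 : Int)) = ((0 : Nat) : Int) by norm_num, PySem.List.pyGetD_natCast]
      rfl
    have g1 : PySem.List.pyGetD s.toList 1 ' ' = c1 := by
      rw [hcs, show ((1 : Int)) = ((1 : Nat) : Int) by norm_num, PySem.List.pyGetD_natCast]
      rfl
    have g2 : PySem.List.pyGetD s.toList 2 ' ' = c2 := by
      rw [hcs, show ((2 : Int)) = ((2 : Nat) : Int) by norm_num, PySem.List.pyGetD_natCast]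
      rfl
    rw [g0, g1, g2, hcs]
    simp only [List.nil_append, pvEmit_window, pvAuxA_eq_pvAuxC]
    rfl
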